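-- pv_equiv track=rewrite | github.com/darien-schettler/aimo-solver | aimo_solver/utils/kaggle_nb_funcs.py | naive_parse
-- ===== SOURCE A (Python) =====
-- def naive_parse(answer: str) -> str:
--     """Extracts the last contiguous sequence of digits from a given string.
--
--     This function is based on the function that is floating around in the top scoring code notebooks.
--     I'm not sure who the original author was... but once I know I will attribute accordingly.
--
--     Args:
--         answer: A string from which to extract the digit sequence.
--
--     Returns:
--         A string containing the last sequence of digits found in the input string.
--         Returns an empty string if no digits are found.
--
--     Examples:
--         naive_parse("example123test456") returns "456"
--         naive_parse("no digits here!") returns ""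
--     """
--     last_digits = ''
--     found_digit = False
--
--     for char in reversed(answer):
--         if char.isdigit():
--             last_digits += char
--             found_digit = True
--         elif found_digit:
--             # Break the loop once the first non-digit is found after finding digits
--             break
--
--     # Reverse to correct the order of digits
--     return last_digits[::-1]
-- ===== SOURCE B (Python) =====
-- def naive_parse(answer: str) -> str:
--     """Forward single pass: accumulate the current contiguous digit run;
--     on each non-digit boundary commit it as the last completed run."""
--     cur = ''
--     last = ''
--     for ch in answer:
--         if ch.isdigit():
--             cur += ch
--         elif cur:
--             last = cur
--             cur = ''
--     return cur if cur else last
-- ===== Notes on version B (the rewrite author's own statement) =====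
-- stated objective: idiomatic
-- what changed: Replaced A's reverse scan with early exit by a forward single pass that accumulates the current digit run and commits it at each non-digit boundary, returning the last completed run.
import Mathlib
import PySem

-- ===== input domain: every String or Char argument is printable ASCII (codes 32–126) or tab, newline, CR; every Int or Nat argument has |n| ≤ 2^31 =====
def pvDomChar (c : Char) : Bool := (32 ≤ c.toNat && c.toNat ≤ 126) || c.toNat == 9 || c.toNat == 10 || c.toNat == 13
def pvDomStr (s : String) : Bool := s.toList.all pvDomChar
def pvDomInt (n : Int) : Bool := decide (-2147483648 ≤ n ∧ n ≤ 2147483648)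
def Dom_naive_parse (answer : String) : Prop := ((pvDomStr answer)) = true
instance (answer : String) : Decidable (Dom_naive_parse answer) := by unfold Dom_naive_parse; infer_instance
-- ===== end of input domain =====

-- B replaces A's reverse scan (with early exit) by a forward single pass committing digit runs; same O(n) cost, objective: idiomatic forward pass.

-- ===== PORT A =====
-- A's loop over reversed(answer), state (last_digits, found_digit); strings handled as their code-point lists, PySem.Chars.isdigit = str.isdigit per char (exact on ASCII).
def npLoopA : List Char → List Char → Bool → List Char
  | [], acc, _ => acc
  | c :: rest, acc, found =>
    if PySem.Chars.isdigit c then npLoopA rest (acc ++ [c]) true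
    else if found then acc
    else npLoopA rest acc found

def naive_parse (answer : String) : String :=
  -- return last_digits[::-1]
  String.ofList ((npLoopA answer.toList.reverse [] false).reverse)

-- ===== PORT B =====
-- B's forward loop body: state (cur, last)
def npStepB (s : List Char × List Char) (c : Char) : List Char × List Char :=
  if PySem.Chars.isdigit c then (s.1 ++ [c], s.2)
  else if s.1 = [] then s
  else ([], s.1)

def naive_parse_alt (answer : String) : String :=
  let s := answer.toList.foldl npStepB ([], [])
  String.ofList (if s.1 = [] then s.2 else s.1)

-- ===== PRECONDITION & SPEC =====
def Spec_naive_parse (answer : String) (out : String) : Prop := out = naive_parse_alt answer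
instance (answer : String) (out : String) : Decidable (Spec_naive_parse answer out) := by unfold Spec_naive_parse; infer_instance

-- ===== CLAIM (what is proved, stated in full; the proofs are below) =====
def Claim_equal_naive_parse : Prop := ∀ (answer : String), Dom_naive_parse answer → Spec_naive_parse answer (naive_parse answer)

-- ===== LEMMAS AND PROOFS =====

-- A's loop once a digit has been found: it takes the remaining digit prefix.
theorem npLoopA_true (l : List Char) : ∀ acc : List Char,
    npLoopA l acc true = acc ++ l.takeWhile PySem.Chars.isdigit := by
  induction l with
  | nil => intro acc; simp [npLoopA]
  | cons c rest ih =>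
    intro acc
    by_cases h : PySem.Chars.isdigit c = true
    · simp [npLoopA, h, ih]
    · simp [npLoopA, h]

-- A's loop before any digit: skip the non-digit prefix, then take digits.
theorem npLoopA_false (l : List Char) :
    npLoopA l [] false =
      (l.dropWhile (fun c => !PySem.Chars.isdigit c)).takeWhile PySem.Chars.isdigit := by
  induction l with
  | nil => simp [npLoopA]
  | cons c rest ih =>
    by_cases h : PySem.Chars.isdigit c = true
    · simp [npLoopA, h, npLoopA_true]
    · simp [npLoopA, h, ih]

-- Invariant of B's fold: cur is the trailing digit run (reversed view), and the
-- final selection equals the last maximal digit run of the input.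
theorem npFoldB_inv (l : List Char) :
    (List.foldl npStepB ([], []) l).1
        = ((l.reverse.takeWhile PySem.Chars.isdigit).reverse : List Char) ∧
    (if (List.foldl npStepB ([], []) l).1 = [] then (List.foldl npStepB ([], []) l).2
        else (List.foldl npStepB ([], []) l).1)
      = ((l.reverse.dropWhile (fun c => !PySem.Chars.isdigit c)).takeWhile
          PySem.Chars.isdigit).reverse := by
  induction l using List.reverseRecOn with
  | nil => simp
  | append_singleton l x ih =>
    obtain ⟨ih1, ih2⟩ := ih
    rw [List.foldl_append, List.foldl_cons, List.foldl_nil]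
    by_cases h : PySem.Chars.isdigit x = true
    · constructor
      · simp [npStepB, h, ih1]
      · simp [npStepB, h, ih1]
    · have hsel : (npStepB (List.foldl npStepB ([], []) l) x).1 = [] := by
        simp [npStepB, h]; split_ifs with hc0 <;> simp [hc0]
      refine ⟨?_, ?_⟩
      · rw [hsel]; simp [h]
      · rw [hsel]
        simp only [List.reverse_append, List.reverse_singleton, List.singleton_append,
          List.dropWhile_cons, h]
        simp only [Bool.not_false, if_true]
        rw [← ih2]
        simp only [npStepB, h, Bool.false_eq_true, if_false]
        split_ifs with hc
        · simp
        · simp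

-- ===== VERDICT (by name: the statement is the Claim_ definition above) =====
theorem naive_parse_spec : Claim_equal_naive_parse := by
  intro answer _
  show naive_parse answer = naive_parse_alt answer
  unfold naive_parse naive_parse_alt
  rw [npLoopA_false]
  have h := (npFoldB_inv answer.toList).2
  simp only []
  rw [h]
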